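-- pv_equiv track=rewrite | github.com/taishi-i/nagisa | nagisa/mecab_system_eval.py | mecab_eval
-- ===== SOURCE A (Python) =====
-- def mecab_eval(sys_data, ans_data):
--     """
--     This script is written by referring to the following code.
--     https://github.com/taku910/mecab/blob/master/mecab/src/eval.cpp
--     """
--     if not len(sys_data) == len(ans_data):
--         raise AssertionError("len(sys_data) != len(ans_data)")
--     num_sents = len(sys_data)
--
--     prec = 0
--     recall = 0
--     num_correct = [0, 0]
--     for i in range(num_sents):
--         i_sys = 0
--         i_ans = 0
--         l_sys = 0
--         l_ans = 0
--         sys_sent = sys_data[i]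
--         ans_sent = ans_data[i]
--
--         while ((i_sys < len(sys_sent)) & (i_ans < len(ans_sent))):
--             if (l_sys == l_ans):
--                 if (sys_sent[i_sys][0] == ans_sent[i_ans][0]):
--                     num_correct[0] += 1 # Word Segmentation
--
--                 if (sys_sent[i_sys][1] == ans_sent[i_ans][1]):
--                     num_correct[1] += 1 # POS-tagging
--
--                 l_sys  += len(sys_sent[i_sys][0])
--                 l_ans  += len(ans_sent[i_ans][0])
--                 i_sys  += 1
--                 i_ans  += 1
--                 prec   += 1
--                 recall += 1
--             elif (l_sys < l_ans):
--                 l_sys  += len(sys_sent[i_sys][0])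
--                 i_sys  += 1
--                 prec   += 1
--             else:
--                 l_ans  += len(ans_sent[i_ans][0])
--                 i_ans  += 1
--                 recall += 1
--
--         while (i_sys < len(sys_sent)):
--             i_sys  += 1
--             prec   += 1
--
--         while (i_ans < len(ans_sent)):
--             i_ans  += 1
--             recall += 1
--
--     ws_c = num_correct[0]
--     pt_c = num_correct[1]
--     return [ws_c, pt_c, prec, recall]
-- ===== SOURCE B (Python) =====
-- def mecab_eval(sys_data, ans_data):
--     if not len(sys_data) == len(ans_data):
--         raise AssertionError("len(sys_data) != len(ans_data)")
--     ws = 0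
--     pt = 0
--     prec = sum(len(sent) for sent in sys_data)
--     recall = sum(len(sent) for sent in ans_data)
--     for sys_sent, ans_sent in zip(sys_data, ans_data):
--         ans_at = {}
--         off = 0
--         for tok in ans_sent:
--             ans_at[off] = tok
--             off += len(tok[0])
--         off = 0
--         for tok in sys_sent:
--             a = ans_at.get(off)
--             if a is not None:
--                 if tok[0] == a[0]:
--                     ws += 1
--                 if tok[1] == a[1]:
--                     pt += 1
--             off += len(tok[0])
--     return [ws, pt, prec, recall]
-- ===== Notes on version B (the rewrite author's own statement) =====
-- stated objective: simpler
-- what changed: Replaces the three-way two-pointer merge walk with per-sentence dicts keyed by cumulative start offset (sys tokens looked up against an ans offset dict), and computes prec/recall directly as total token counts instead of incrementing them inside the merge loop.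
-- outside the precondition, e.g. on mecab_eval([[('', 'N'), ('a', 'V')]], [[('a', 'V')]]): A returns [0, 0, 2, 1], B returns [1, 1, 2, 1]
import Mathlib
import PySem

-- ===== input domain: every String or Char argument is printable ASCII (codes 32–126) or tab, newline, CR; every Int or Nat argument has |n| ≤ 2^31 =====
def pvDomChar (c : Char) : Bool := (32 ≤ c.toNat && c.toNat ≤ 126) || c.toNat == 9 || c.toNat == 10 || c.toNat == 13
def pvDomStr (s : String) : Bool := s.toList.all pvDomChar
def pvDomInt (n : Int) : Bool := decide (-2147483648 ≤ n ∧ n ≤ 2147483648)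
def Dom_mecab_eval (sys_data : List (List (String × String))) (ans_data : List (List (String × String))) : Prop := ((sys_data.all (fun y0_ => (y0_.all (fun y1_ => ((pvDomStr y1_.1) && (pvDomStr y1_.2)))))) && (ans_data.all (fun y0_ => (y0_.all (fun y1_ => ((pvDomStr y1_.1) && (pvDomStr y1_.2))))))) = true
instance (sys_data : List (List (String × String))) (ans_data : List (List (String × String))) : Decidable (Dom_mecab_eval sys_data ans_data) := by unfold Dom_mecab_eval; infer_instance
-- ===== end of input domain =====

-- B replaces A's two-pointer merge walk by per-sentence offset-keyed dict lookups and computes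
-- precision/recall denominators as plain token counts (objective: simpler; same asymptotic cost).

-- ===== PORT A =====
-- the two trailing 'while' loops of A: one increment per leftover token
def pvTailA : List (String × String) → Int → Int
  | [], acc => acc
  | _ :: ts, acc => pvTailA ts (acc + 1)

-- the main 'while' loop of A over one sentence pair, with all its mutable state as parameters
def pvWalkA : List (String × String) → List (String × String) → Int → Int → Int → Int → Int → Int → Int × Int × Int × Int
  | [], ans, _, _, ws, pt, prc, rcl => (ws, pt, prc, pvTailA ans rcl)
  | s :: st, [], _, _, ws, pt, prc, rcl => (ws, pt, pvTailA (s :: st) prc, rcl)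
  | s :: st, a :: at_, lsys, lans, ws, pt, prc, rcl =>
    if lsys = lans then
      pvWalkA st at_ (lsys + PySem.Str.len s.1) (lans + PySem.Str.len a.1)
        (ws + (if s.1 = a.1 then 1 else 0)) (pt + (if s.2 = a.2 then 1 else 0)) (prc + 1) (rcl + 1)
    else if lsys < lans then
      pvWalkA st (a :: at_) (lsys + PySem.Str.len s.1) lans ws pt (prc + 1) rcl
    else
      pvWalkA (s :: st) at_ lsys (lans + PySem.Str.len a.1) ws pt prc (rcl + 1)
  termination_by sys ans _ _ _ _ _ _ => sys.length + ans.length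
  decreasing_by all_goals (simp only [List.length_cons]; omega)

-- the 'for i in range(num_sents)' loop of A (sentences paired by index)
def pvLoopA : List (List (String × String) × List (String × String)) → Int × Int × Int × Int → Int × Int × Int × Int
  | [], acc => acc
  | p :: ps, (ws, pt, prc, rcl) => pvLoopA ps (pvWalkA p.1 p.2 0 0 ws pt prc rcl)

def mecab_eval (sys_data : List (List (String × String))) (ans_data : List (List (String × String))) : List Int :=
  let r := pvLoopA (sys_data.zip ans_data) (0, 0, 0, 0)
  [r.1, r.2.1, r.2.2.1, r.2.2.2]

-- ===== PORT B =====
-- build the {cumulative start offset -> token} dict of one answer sentence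
def pvBuildB : List (String × String) → Int → PySem.Dict Int (String × String) → PySem.Dict Int (String × String)
  | [], _, d => d
  | t :: ts, off, d => pvBuildB ts (off + PySem.Str.len t.1) (d.insert off t)

-- scan the system sentence, looking each token's start offset up in the answer dict
def pvScanB : List (String × String) → Int → PySem.Dict Int (String × String) → Int → Int → Int × Int
  | [], _, _, ws, pt => (ws, pt)
  | t :: ts, off, d, ws, pt =>
    match d.get? off with
    | some a => pvScanB ts (off + PySem.Str.len t.1) d
        (ws + (if t.1 = a.1 then 1 else 0)) (pt + (if t.2 = a.2 then 1 else 0))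
    | none => pvScanB ts (off + PySem.Str.len t.1) d ws pt

def pvLoopB : List (List (String × String) × List (String × String)) → Int → Int → Int × Int
  | [], ws, pt => (ws, pt)
  | p :: ps, ws, pt =>
    let r := pvScanB p.1 0 (pvBuildB p.2 0 PySem.Dict.empty) ws pt
    pvLoopB ps r.1 r.2

def mecab_eval_alt (sys_data : List (List (String × String))) (ans_data : List (List (String × String))) : List Int :=
  let prc := (sys_data.map (fun s => (s.length : Int))).sum
  let rcl := (ans_data.map (fun s => (s.length : Int))).sum
  let r := pvLoopB (sys_data.zip ans_data) 0 0
  [r.1, r.2, prc, rcl]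

-- ===== PRECONDITION & SPEC =====
-- Pre_ excludes (a) unequal-length inputs, on which A raises AssertionError, and (b) inputs containing
-- a zero-length surface token, on which colliding cumulative offsets make A's positional pairing an
-- accidental artefact that an offset-keyed dict cannot reproduce.
def Pre_mecab_eval (sys_data : List (List (String × String))) (ans_data : List (List (String × String))) : Prop :=
  sys_data.length = ans_data.length ∧
  (∀ s ∈ sys_data, ∀ t ∈ s, 0 < PySem.Str.len t.1) ∧
  (∀ s ∈ ans_data, ∀ t ∈ s, 0 < PySem.Str.len t.1)
instance (sys_data : List (List (String × String))) (ans_data : List (List (String × String))) : Decidable (Pre_mecab_eval sys_data ans_data) := by unfold Pre_mecab_eval; infer_instance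

def pvWitness_mecab_eval : (List (List (String × String))) × (List (List (String × String))) :=
  ([[("a", "N"), ("bc", "V")]], [[("ab", "N"), ("c", "V")]])

def Spec_mecab_eval (sys_data : List (List (String × String))) (ans_data : List (List (String × String))) (out : List Int) : Prop := out = mecab_eval_alt sys_data ans_data
instance (sys_data : List (List (String × String))) (ans_data : List (List (String × String))) (out : List Int) : Decidable (Spec_mecab_eval sys_data ans_data out) := by unfold Spec_mecab_eval; infer_instance

-- ===== CLAIM (what is proved, stated in full; the proofs are below) =====
def Claim_equal_mecab_eval : Prop := ∀ (sys_data : List (List (String × String))) (ans_data : List (List (String × String))), Dom_mecab_eval sys_data ans_data → Pre_mecab_eval sys_data ans_data → Spec_mecab_eval sys_data ans_data (mecab_eval sys_data ans_data)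

-- ===== LEMMAS AND PROOFS =====

lemma pvTailA_eq (l : List (String × String)) : ∀ acc, pvTailA l acc = acc + l.length := by
  induction l with
  | nil => intro acc; simp [pvTailA]
  | cons t ts ih => intro acc; simp [pvTailA, ih]; omega

-- the start offsets pvScanB queries when scanning l from off
def pvQoffs : List (String × String) → Int → List Int
  | [], _ => []
  | t :: ts, off => off :: pvQoffs ts (off + PySem.Str.len t.1)

lemma pvLen_nonneg (s : String) : 0 ≤ PySem.Str.len s := by
  simp [PySem.Str.len_eq]

lemma pvQoffs_ge (l : List (String × String)) : ∀ off k, k ∈ pvQoffs l off → off ≤ k := by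
  induction l with
  | nil => intro off k h; simp [pvQoffs] at h
  | cons t ts ih =>
    intro off k h
    simp [pvQoffs] at h
    rcases h with h | h
    · omega
    · have := ih (off + PySem.Str.len t.1) k h
      have := pvLen_nonneg t.1
      omega

lemma pvScanB_congr (l : List (String × String)) :
    ∀ off d₁ d₂ ws pt, (∀ k ∈ pvQoffs l off, d₁.get? k = d₂.get? k) →
    pvScanB l off d₁ ws pt = pvScanB l off d₂ ws pt := by
  induction l with
  | nil => intro off d₁ d₂ ws pt _; simp [pvScanB]
  | cons t ts ih =>
    intro off d₁ d₂ ws pt h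
    have h0 : d₁.get? off = d₂.get? off := h off (by simp [pvQoffs])
    have htl : ∀ k ∈ pvQoffs ts (off + PySem.Str.len t.1), d₁.get? k = d₂.get? k := by
      intro k hk; exact h k (by simp [pvQoffs]; right; exact hk)
    simp only [pvScanB, h0]
    cases d₂.get? off with
    | none => exact ih _ _ _ _ _ htl
    | some a => exact ih _ _ _ _ _ htl

lemma pvScanB_empty (l : List (String × String)) :
    ∀ off ws pt, pvScanB l off PySem.Dict.empty ws pt = (ws, pt) := by
  induction l with
  | nil => intro off ws pt; simp [pvScanB]
  | cons t ts ih => intro off ws pt; simp [pvScanB, PySem.Dict.get?_empty, ih]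

lemma pvBuildB_get? (l : List (String × String)) :
    ∀ off d k, (pvBuildB l off d).get? k
      = ((pvBuildB l off PySem.Dict.empty).get? k).or (d.get? k) := by
  induction l with
  | nil => intro off d k; simp [pvBuildB, PySem.Dict.get?_empty]
  | cons t ts ih =>
    intro off d k
    simp only [pvBuildB]
    rw [ih (off + PySem.Str.len t.1) (d.insert off t) k,
        ih (off + PySem.Str.len t.1) (PySem.Dict.empty.insert off t) k]
    rw [PySem.Dict.get?_insert, PySem.Dict.get?_insert]
    cases hx : (pvBuildB ts (off + PySem.Str.len t.1) PySem.Dict.empty).get? k <;>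
      by_cases hk : k = off <;> simp [hk, PySem.Dict.get?_empty]

lemma pvBuildB_get?_lt (l : List (String × String)) :
    ∀ off k, k < off → (pvBuildB l off PySem.Dict.empty).get? k = none := by
  induction l with
  | nil => intro off k _; simp [pvBuildB, PySem.Dict.get?_empty]
  | cons t ts ih =>
    intro off k hk
    simp only [pvBuildB]
    rw [pvBuildB_get? ts (off + PySem.Str.len t.1) (PySem.Dict.empty.insert off t) k]
    have hlen := pvLen_nonneg t.1
    rw [ih (off + PySem.Str.len t.1) k (by omega)]
    rw [PySem.Dict.get?_insert]
    simp [show k ≠ off by omega, PySem.Dict.get?_empty]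

-- A's merge walk over one sentence pair equals B's dict scan, and contributes the token counts to prc/rcl
lemma pvWalk_eq (n : Nat) : ∀ (sys ans : List (String × String)) (ls la ws pt prc rcl : Int),
    sys.length + ans.length ≤ n →
    (∀ t ∈ sys, 0 < PySem.Str.len t.1) → (∀ t ∈ ans, 0 < PySem.Str.len t.1) →
    pvWalkA sys ans ls la ws pt prc rcl =
      ((pvScanB sys ls (pvBuildB ans la PySem.Dict.empty) ws pt).1,
       (pvScanB sys ls (pvBuildB ans la PySem.Dict.empty) ws pt).2,
       prc + sys.length, rcl + ans.length) := by
  induction n with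
  | zero =>
    intro sys ans ls la ws pt prc rcl hn _ _
    have hs : sys = [] := by cases sys <;> simp_all
    have ha : ans = [] := by cases ans <;> simp_all
    subst hs; subst ha
    simp [pvWalkA, pvScanB, pvTailA]
  | succ n ih =>
    intro sys ans ls la ws pt prc rcl hn hsys hans
    match sys, ans with
    | [], ans =>
      simp [pvWalkA, pvScanB, pvTailA_eq]
    | s :: st, [] =>
      simp [pvWalkA, pvBuildB, pvScanB_empty, pvTailA_eq]
    | s :: st, a :: at_ =>
      have hs : 0 < PySem.Str.len s.1 := hsys s (by simp)
      have ha : 0 < PySem.Str.len a.1 := hans a (by simp)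
      have hsys' : ∀ t ∈ st, 0 < PySem.Str.len t.1 := fun t ht => hsys t (by simp [ht])
      have hans' : ∀ t ∈ at_, 0 < PySem.Str.len t.1 := fun t ht => hans t (by simp [ht])
      simp only [pvWalkA]
      by_cases heq : ls = la
      · subst heq
        rw [ih st at_ (ls + PySem.Str.len s.1) (ls + PySem.Str.len a.1)
              (ws + (if s.1 = a.1 then 1 else 0)) (pt + (if s.2 = a.2 then 1 else 0))
              (prc + 1) (rcl + 1) (by simp at hn ⊢; omega) hsys' hans']
        -- B side: head lookup hits a, then the dict's extra (ls, a) entry never matters again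
        have hhead : (pvBuildB (a :: at_) ls PySem.Dict.empty).get? ls = some a := by
          simp only [pvBuildB]
          rw [pvBuildB_get? at_ (ls + PySem.Str.len a.1) (PySem.Dict.empty.insert ls a) ls]
          rw [pvBuildB_get?_lt at_ (ls + PySem.Str.len a.1) ls (by omega)]
          rw [PySem.Dict.get?_insert]
          simp
        have hcongr : pvScanB st (ls + PySem.Str.len s.1) (pvBuildB (a :: at_) ls PySem.Dict.empty)
              (ws + (if s.1 = a.1 then 1 else 0)) (pt + (if s.2 = a.2 then 1 else 0))
            = pvScanB st (ls + PySem.Str.len s.1)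
                (pvBuildB at_ (ls + PySem.Str.len a.1) PySem.Dict.empty)
              (ws + (if s.1 = a.1 then 1 else 0)) (pt + (if s.2 = a.2 then 1 else 0)) := by
          apply pvScanB_congr
          intro k hk
          have hge := pvQoffs_ge st (ls + PySem.Str.len s.1) k hk
          simp only [pvBuildB]
          rw [pvBuildB_get? at_ (ls + PySem.Str.len a.1) (PySem.Dict.empty.insert ls a) k]
          rw [PySem.Dict.get?_insert]
          simp [show k ≠ ls by omega, PySem.Dict.get?_empty]
        simp only [pvScanB, hhead, hcongr]
        simp; omega
      · by_cases hlt : ls < la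
        · simp only [if_neg heq, if_pos hlt]
          rw [ih st (a :: at_) (ls + PySem.Str.len s.1) la ws pt (prc + 1) rcl
                (by simp at hn ⊢; omega) hsys' hans]
          have hnone : (pvBuildB (a :: at_) la PySem.Dict.empty).get? ls = none :=
            pvBuildB_get?_lt (a :: at_) la ls hlt
          simp only [pvScanB, hnone]
          simp; omega
        · simp only [if_neg heq, if_neg hlt]
          rw [ih (s :: st) at_ ls (la + PySem.Str.len a.1) ws pt prc (rcl + 1)
                (by simp at hn ⊢; omega) hsys hans']
          have hcongr : pvScanB (s :: st) ls (pvBuildB (a :: at_) la PySem.Dict.empty) ws pt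
              = pvScanB (s :: st) ls (pvBuildB at_ (la + PySem.Str.len a.1) PySem.Dict.empty) ws pt := by
            apply pvScanB_congr
            intro k hk
            have hge := pvQoffs_ge (s :: st) ls k hk
            simp only [pvBuildB]
            rw [pvBuildB_get? at_ (la + PySem.Str.len a.1) (PySem.Dict.empty.insert la a) k]
            rw [PySem.Dict.get?_insert]
            simp [show k ≠ la by omega, PySem.Dict.get?_empty]
          rw [hcongr]
          simp; omega

lemma pvLoop_eq : ∀ (sys ans : List (List (String × String))) (ws pt prc rcl : Int),
    sys.length = ans.length →
    (∀ s ∈ sys, ∀ t ∈ s, 0 < PySem.Str.len t.1) →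
    (∀ s ∈ ans, ∀ t ∈ s, 0 < PySem.Str.len t.1) →
    pvLoopA (sys.zip ans) (ws, pt, prc, rcl) =
      ((pvLoopB (sys.zip ans) ws pt).1, (pvLoopB (sys.zip ans) ws pt).2,
       prc + (sys.map (fun s => (s.length : Int))).sum,
       rcl + (ans.map (fun s => (s.length : Int))).sum) := by
  intro sys
  induction sys with
  | nil =>
    intro ans ws pt prc rcl hlen _ _
    have : ans = [] := by cases ans <;> simp_all
    subst this
    simp [pvLoopA, pvLoopB]
  | cons s st ih =>
    intro ans ws pt prc rcl hlen hsys hans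
    match ans with
    | [] => simp at hlen
    | a :: at_ =>
      simp only [List.zip_cons_cons, pvLoopA, pvLoopB]
      rw [pvWalk_eq (s.length + a.length) s a 0 0 ws pt prc rcl (le_refl _)
            (hsys s (by simp)) (hans a (by simp))]
      rw [ih at_ _ _ _ _ (by simpa using hlen)
            (fun x hx => hsys x (by simp [hx])) (fun x hx => hans x (by simp [hx]))]
      simp
      omega

-- ===== VERDICT (by name: the statement is the Claim_ definition above) =====
theorem mecab_eval_spec : Claim_equal_mecab_eval := by
  intro sys_data ans_data _ hpre
  obtain ⟨hlen, hsys, hans⟩ := hpre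
  unfold Spec_mecab_eval mecab_eval mecab_eval_alt
  rw [pvLoop_eq sys_data ans_data 0 0 0 0 hlen hsys hans]
  simp
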